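-- pv_equiv track=rewrite | github.com/sukanyaVS/training | python_generator.py | grade_generator
-- ===== SOURCE A (Python) =====
-- def grade_generator(data):
--     for name,mark in data:
--
--         match mark:
--             case A if mark >= 90:
--                 grade = "A"
--             case B if mark >= 75:
--                 grade = "B"
--             case C if mark >= 50:
--                 grade = "C"
--             case _:
--                 grade = 'Fail'
--
--         yield (name,mark,grade)
-- ===== SOURCE B (Python) =====
-- def grade_generator(data):
--     # Staged iterative-refinement: start everyone at 'Fail', then make one
--     # full pass per ascending cutoff, overwriting the grade of every student
--     # whose mark meets that cutoff; finally zip the rows with their grades.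
--     rows = [(name, mark) for name, mark in data]
--     grades = ['Fail'] * len(rows)
--     for cutoff, letter in ((50, 'C'), (75, 'B'), (90, 'A')):
--         for i, (_, mark) in enumerate(rows):
--             if mark >= cutoff:
--                 grades[i] = letter
--     for (name, mark), grade in zip(rows, grades):
--         yield (name, mark, grade)
-- ===== Notes on version B (the rewrite author's own statement) =====
-- stated objective: alternative
-- what changed: Replaced the per-element match/guard chain by iterative refinement in staged passes: a parallel grade list initialised to 'Fail' is overwritten in three whole-list passes, one per ascending cutoff, and then zipped with the rows.
import Mathlib
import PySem

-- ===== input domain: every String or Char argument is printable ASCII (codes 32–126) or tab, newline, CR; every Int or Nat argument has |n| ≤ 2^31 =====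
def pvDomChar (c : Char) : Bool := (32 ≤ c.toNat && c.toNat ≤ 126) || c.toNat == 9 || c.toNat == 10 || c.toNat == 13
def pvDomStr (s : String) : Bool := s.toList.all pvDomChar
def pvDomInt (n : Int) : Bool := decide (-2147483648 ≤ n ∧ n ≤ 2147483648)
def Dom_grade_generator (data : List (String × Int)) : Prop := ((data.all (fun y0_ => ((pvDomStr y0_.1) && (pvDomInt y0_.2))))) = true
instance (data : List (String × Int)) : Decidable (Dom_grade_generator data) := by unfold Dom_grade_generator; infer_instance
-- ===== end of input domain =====

-- B replaces A's per-element match/guard chain by staged whole-list passes: grades start at "Fail"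
-- and are overwritten once per ascending cutoff, then zipped with the rows (alternative; same cost).

-- ===== PORT A =====
-- the match/guard chain: grade chosen by the first threshold the mark meets, top-down
def grade_generator (data : List (String × Int)) : List (String × Int × String) :=
  data.map (fun nm =>
    let grade : String :=
      if nm.2 ≥ 90 then "A"
      else if nm.2 ≥ 75 then "B"
      else if nm.2 ≥ 50 then "C"
      else "Fail"
    (nm.1, nm.2, grade))

-- ===== PORT B =====
def pvPasses : List (Int × String) := [(50, "C"), (75, "B"), (90, "A")]

def grade_generator_alt (data : List (String × Int)) : List (String × Int × String) :=
  let rows := data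
  let grades0 := rows.map (fun _ => "Fail")
  let grades := pvPasses.foldl
    (fun g p => List.zipWith (fun nm old => if nm.2 ≥ p.1 then p.2 else old) rows g) grades0
  List.zipWith (fun nm g => (nm.1, nm.2, g)) rows grades

-- ===== PRECONDITION & SPEC =====
def Spec_grade_generator (data : List (String × Int)) (out : List (String × Int × String)) : Prop := out = grade_generator_alt data
instance (data : List (String × Int)) (out : List (String × Int × String)) : Decidable (Spec_grade_generator data out) := by unfold Spec_grade_generator; infer_instance

-- ===== CLAIM (what is proved, stated in full; the proofs are below) =====
def Claim_equal_grade_generator : Prop := ∀ (data : List (String × Int)), Dom_grade_generator data → Spec_grade_generator data (grade_generator data)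

-- ===== LEMMAS AND PROOFS =====

-- ===== VERDICT (by name: the statement is the Claim_ definition above) =====
theorem grade_generator_spec : Claim_equal_grade_generator := by
  intro data _hd
  clear _hd
  unfold Spec_grade_generator grade_generator grade_generator_alt pvPasses
  simp only [List.foldl_cons, List.foldl_nil]
  induction data with
  | nil => rfl
  | cons h t ih =>
    simp only [List.map_cons, List.zipWith_cons_cons, List.cons.injEq] at ih ⊢
    refine ⟨?_, ih⟩
    trivial
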